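-- pv_equiv track=rewrite | github.com/stenskjaer/lemmatizer | concordia.py | find_lemmas
-- ===== SOURCE A (Python) =====
-- def recursive_string_find(pattern, string, where_should_I_start=0):
--     """Recursive search function.
--
--     Returns list of indices of `pattern` in `string`.
--     """
--     pos = string.find(pattern, where_should_I_start)
--     if pos == -1:
--         # Not found!
--         return []
--
--     # No need for else statement
--     return [pos] + recursive_string_find(pattern, string, pos + len(pattern))
--
-- def find_lemmas(token, lemma_string):
--     """Find all the possible lemma suggestions to one token. Input the
--     need and haystack, the token that needs to be parsed, and the list
--     of lemmas.
--
--     Returns a list of possible lemmas.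
--     """
--
--     result_list = []
--     token = ' ' + token.strip() + ' '
--     lemma_list = recursive_string_find(token, lemma_string)
--     for item in lemma_list:
--         previous_linebreak = lemma_string.rfind('\n', item-5000, item)
--         match = lemma_string[previous_linebreak:previous_linebreak+40].split(' ')[0]
--         result_list.append(match)
--
--     return(result_list)
-- ===== SOURCE B (Python) =====
-- def find_lemmas(token, lemma_string):
--     """Find all the possible lemma suggestions to one token.
--
--     Character-level scan: instead of recursive str.find calls collecting an
--     index list and a second loop, walk the haystack once with startswith,
--     emitting each match's first word (via partition) as it is found.
--     """
--     needle = ' ' + token.strip() + ' '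
--     n, k = len(lemma_string), len(needle)
--     result_list = []
--     i = 0
--     while i + k <= n:
--         if lemma_string.startswith(needle, i):
--             prev = lemma_string.rfind('\n', i - 5000, i)
--             result_list.append(lemma_string[prev:prev + 40].partition(' ')[0])
--             i += k
--         else:
--             i += 1
--     return result_list
-- ===== Notes on version B (the rewrite author's own statement) =====
-- stated objective: alternative
-- what changed: Replaces the recursive helper that materialises an index list via repeated str.find plus a second for-loop with a single character-level scan: one while loop walks every position, tests startswith, and emits each match's first word (computed with partition instead of split) on the spot.
import Mathlib
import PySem

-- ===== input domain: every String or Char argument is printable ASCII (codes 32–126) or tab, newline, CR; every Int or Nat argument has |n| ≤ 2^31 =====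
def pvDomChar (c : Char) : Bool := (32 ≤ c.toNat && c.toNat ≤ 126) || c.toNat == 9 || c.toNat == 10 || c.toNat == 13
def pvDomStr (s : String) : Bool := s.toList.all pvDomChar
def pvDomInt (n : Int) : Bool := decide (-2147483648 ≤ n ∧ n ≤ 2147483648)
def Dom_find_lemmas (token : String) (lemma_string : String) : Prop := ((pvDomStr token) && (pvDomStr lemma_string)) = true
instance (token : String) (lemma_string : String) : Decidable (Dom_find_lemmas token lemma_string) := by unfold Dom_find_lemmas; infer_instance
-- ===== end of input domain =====

-- B replaces A's recursive str.find index-collecting helper + second loop with one character-level startswith scan (alternative decomposition; same cost).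


-- ===== PORT A =====
-- lemma_string.rfind('\n', item-5000, item); lemma_string[prev:prev+40].split(' ')[0]
def pvMatchAt (ls : List Char) (item : Int) : String :=
  let prev := PySem.Chars.rfindFrom ls ['\n'] (item - 5000) (some item)
  String.ofList (((PySem.Chars.split? (PySem.Chars.slice ls (some prev) (some (prev + 40))) [' ']).getD []).headD [])

-- recursive_string_find, totalised with fuel (the padded token is nonempty, so Python's
-- recursion always terminates and string.length + 1 steps suffice)
def recursive_string_find (fuel : Nat) (pattern : List Char) (string : List Char)
    (where_should_I_start : Int) : List Int :=
  match fuel with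
  | 0 => []
  | fuel + 1 =>
    let pos := PySem.Chars.findFrom string pattern where_should_I_start none
    if pos = -1 then []
    else pos :: recursive_string_find fuel pattern string (pos + pattern.length)

def find_lemmas (token : String) (lemma_string : String) : List String :=
  let ls := lemma_string.toList
  let tok := ' ' :: (PySem.Chars.strip token.toList ++ [' '])
  let lemma_list := recursive_string_find (ls.length + 1) tok ls 0
  lemma_list.foldl (fun result_list item => result_list ++ [pvMatchAt ls item]) []

-- ===== PORT B =====
-- the first word of the 40-char window after the previous linebreak:
-- lemma_string.rfind('\n', i-5000, i); lemma_string[prev:prev+40].partition(' ')[0]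
-- (partition(' ')[0] is exactly the maximal space-free prefix, i.e. takeWhile)
def pvHit (ls : List Char) (i : Nat) : String :=
  let prev := PySem.Chars.rfindFrom ls ['\n'] ((i : Int) - 5000) (some (i : Int))
  String.ofList ((PySem.Chars.slice ls (some prev) (some (prev + 40))).takeWhile (· ≠ ' '))

-- the while loop: i walks every position; 'lemma_string.startswith(needle, i)' is
-- startswith on ls.drop i (i is an in-range Nat index).  The '0 < needle.length'
-- conjunct only makes the recursion total; in every use the needle is nonempty.
def pvScan (needle : List Char) (ls : List Char) (i : Nat) (acc : List String) : List String :=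
  if h : 0 < needle.length ∧ i + needle.length ≤ ls.length then
    if PySem.Chars.startswith (ls.drop i) needle then
      pvScan needle ls (i + needle.length) (acc ++ [pvHit ls i])
    else
      pvScan needle ls (i + 1) acc
  else acc
termination_by ls.length + 1 - i
decreasing_by all_goals omega

def find_lemmas_alt (token : String) (lemma_string : String) : List String :=
  let ls := lemma_string.toList
  let needle := ' ' :: (PySem.Chars.strip token.toList ++ [' '])
  pvScan needle ls 0 []

-- ===== PRECONDITION & SPEC =====
def Spec_find_lemmas (token : String) (lemma_string : String) (out : List String) : Prop := out = find_lemmas_alt token lemma_string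
instance (token : String) (lemma_string : String) (out : List String) : Decidable (Spec_find_lemmas token lemma_string out) := by unfold Spec_find_lemmas; infer_instance

-- ===== CLAIM (what is proved, stated in full; the proofs are below) =====
def Claim_equal_find_lemmas : Prop := ∀ (token : String) (lemma_string : String), Dom_find_lemmas token lemma_string → Spec_find_lemmas token lemma_string (find_lemmas token lemma_string)

-- ===== LEMMAS AND PROOFS =====

-- split-by-one-space: the accumulator splits off, and the first piece of the
-- result is the maximal space-free prefix (what partition(' ')[0] computes)
theorem splitOn_go_append (sep : List Char) :
    ∀ (fuel : Nat) (l cur : List Char) (acc : List (List Char)),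
      PySem.Chars.splitOn.go sep fuel l cur acc =
        acc.reverse ++ PySem.Chars.splitOn.go sep fuel l cur [] := by
  intro fuel
  induction fuel with
  | zero => intro l cur acc; simp [PySem.Chars.splitOn.go]
  | succ n ih =>
    intro l cur acc
    cases l with
    | nil => simp [PySem.Chars.splitOn.go]
    | cons c rest =>
      simp only [PySem.Chars.splitOn.go]
      by_cases h : sep.isPrefixOf (c :: rest)
      · simp only [h, if_true]
        rw [ih _ _ (cur.reverse :: acc), ih _ _ [cur.reverse]]
        simp
      · simp only [h]
        exact ih _ _ acc

theorem splitOn_go_head :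
    ∀ (fuel : Nat) (l cur : List Char), l.length < fuel →
      (PySem.Chars.splitOn.go [' '] fuel l cur []).headD [] =
        cur.reverse ++ l.takeWhile (· ≠ ' ') := by
  intro fuel
  induction fuel with
  | zero => intro l cur h; omega
  | succ n ih =>
    intro l cur h
    cases l with
    | nil => simp [PySem.Chars.splitOn.go]
    | cons c rest =>
      simp only [PySem.Chars.splitOn.go]
      by_cases hc : c = ' '
      · have hp : [' '].isPrefixOf (c :: rest) = true := by simp [hc, List.isPrefixOf]
        rw [hp]
        simp only [if_true]
        rw [splitOn_go_append]
        simp [hc]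
      · have hp : [' '].isPrefixOf (c :: rest) = false := by
          simp [List.isPrefixOf]; exact fun hh => hc hh.symm
        rw [hp]
        simp only [Bool.false_eq_true, if_false]
        rw [ih rest (c :: cur) (by simpa using Nat.lt_of_succ_lt_succ h)]
        simp [hc]

theorem head_splitOn_space (w : List Char) :
    (PySem.Chars.splitOn w [' ']).head?.getD [] = w.takeWhile (fun x => !decide (x = ' ')) := by
  have := splitOn_go_head (w.length + 1) w [] (by omega)
  simpa [PySem.Chars.splitOn] using this

theorem pvHit_eq_pvMatchAt (ls : List Char) (i : Nat) :
    pvHit ls i = pvMatchAt ls (i : Int) := by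
  simp only [pvHit, pvMatchAt, PySem.Chars.split?]
  simp [head_splitOn_space]

-- a prefix at a later position is an infix of the earlier drop
theorem prefix_drop_infix (needle ls : List Char) {i j : Nat} (hij : i ≤ j)
    (h : needle <+: ls.drop j) : needle <:+: ls.drop i := by
  refine List.infix_iff_prefix_suffix.2 ⟨ls.drop j, ?_, ?_⟩
  · exact h
  · have : (ls.drop i).drop (j - i) = ls.drop j := by
      rw [List.drop_drop]; congr 1; omega
    calc ls.drop j = (ls.drop i).drop (j - i) := this.symm
      _ <:+ ls.drop i := List.drop_suffix _ _

-- if the needle occurs nowhere at or after i, the scan adds nothing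
theorem pvScan_no_occ (needle ls : List Char) :
    ∀ (d : Nat) (i : Nat) (acc : List String), ls.length + 1 - i ≤ d →
      (∀ j, i ≤ j → ¬ needle <+: ls.drop j) →
      pvScan needle ls i acc = acc := by
  intro d
  induction d with
  | zero =>
    intro i acc hd _
    rw [pvScan]
    have hg : ¬ (0 < needle.length ∧ i + needle.length ≤ ls.length) := by omega
    simp [hg]
  | succ n ih =>
    intro i acc hd h
    rw [pvScan]
    by_cases hg : 0 < needle.length ∧ i + needle.length ≤ ls.length
    · have hs : ¬ PySem.Chars.startswith (ls.drop i) needle = true := by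
        rw [PySem.Chars.startswith_iff]
        exact h i le_rfl
      simp only [hg, hs]
      exact ih (i + 1) acc (by omega) (fun j hj => h j (by omega))
    · simp [hg]

-- walking from i up to the first occurrence q emits exactly the hit at q
theorem pvScan_walk (needle ls : List Char) (hne : 0 < needle.length) (q : Nat)
    (hq : needle <+: ls.drop q) :
    ∀ (d : Nat) (i : Nat) (acc : List String), q - i ≤ d → i ≤ q →
      (∀ j, i ≤ j → j < q → ¬ needle <+: ls.drop j) →
      pvScan needle ls i acc =
        pvScan needle ls (q + needle.length) (acc ++ [pvHit ls q]) := by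
  have hqlen : q + needle.length ≤ ls.length := by
    have h1 := hq.length_le
    have h2 : (ls.drop q).length = ls.length - q := List.length_drop
    have h3 : needle ≠ [] := by intro hnil; rw [hnil] at hne; simp at hne
    have h4 : ls.drop q ≠ [] := by
      intro hnil; rw [hnil] at hq; exact h3 (List.prefix_nil.1 hq)
    have h5 : q < ls.length := by
      by_contra hc
      exact h4 (List.drop_eq_nil_of_le (by omega))
    omega
  intro d
  induction d with
  | zero =>
    intro i acc hd hi _
    have hiq : i = q := by omega
    subst hiq
    rw [pvScan]
    have hg : 0 < needle.length ∧ i + needle.length ≤ ls.length := ⟨hne, hqlen⟩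
    have hs : PySem.Chars.startswith (ls.drop i) needle = true :=
      (PySem.Chars.startswith_iff _ _).2 hq
    simp [hg, hs]
  | succ n ih =>
    intro i acc hd hi hmin
    by_cases hiq : i = q
    · subst hiq
      rw [pvScan]
      have hg : 0 < needle.length ∧ i + needle.length ≤ ls.length := ⟨hne, hqlen⟩
      have hs : PySem.Chars.startswith (ls.drop i) needle = true :=
        (PySem.Chars.startswith_iff _ _).2 hq
      simp [hg, hs]
    · rw [pvScan]
      have hg : 0 < needle.length ∧ i + needle.length ≤ ls.length := ⟨hne, by omega⟩
      have hs : ¬ PySem.Chars.startswith (ls.drop i) needle = true := by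
        rw [PySem.Chars.startswith_iff]
        exact hmin i le_rfl (by omega)
      simp only [hg, hs]
      exact ih (i + 1) acc (by omega) (by omega) (fun j hj hjq => hmin j (by omega) hjq)

-- the crux: the scan computes the map of pvMatchAt over A's index list
theorem pvScan_eq_rsf (needle ls : List Char) (hne : 0 < needle.length) :
    ∀ (d : Nat) (i : Nat) (fuel : Nat) (acc : List String),
      ls.length + 1 - i ≤ d → i ≤ ls.length → ls.length + 1 ≤ fuel + i →
      pvScan needle ls i acc =
        acc ++ (recursive_string_find fuel needle ls (i : Int)).map (pvMatchAt ls) := by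
  intro d
  induction d with
  | zero => intro i fuel acc hd hi hf; omega
  | succ n ih =>
    intro i fuel acc hd hi hf
    cases fuel with
    | zero => omega
    | succ f =>
      by_cases hp : PySem.Chars.findFrom ls needle (i : Int) none = -1
      · rw [recursive_string_find]
        simp only [hp, if_pos]
        simp only [List.map_nil, List.append_nil]
        have hninf : ¬ needle <:+: ls.drop i :=
          (PySem.Chars.findFrom_natCast_eq_neg_one_iff ls needle i hi).1 hp
        exact pvScan_no_occ needle ls (ls.length + 1 - i) i acc le_rfl
          (fun j hj hpre => hninf (prefix_drop_infix needle ls hj hpre))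
      · obtain ⟨hip, hpref, hmin⟩ := PySem.Chars.findFrom_natCast_spec ls needle i hi hp
        set p := PySem.Chars.findFrom ls needle (i : Int) none with hpdef
        have hp0 : 0 ≤ p := le_trans (by exact_mod_cast Int.natCast_nonneg i) hip
        have hpq : p = (p.toNat : Int) := (Int.toNat_of_nonneg hp0).symm
        set q := p.toNat with hqdef
        have hiq : i ≤ q := by omega
        have hqlen : q + needle.length ≤ ls.length := by
          have h1 := hpref.length_le
          have h2 : (ls.drop q).length = ls.length - q := List.length_drop
          have h4 : ls.drop q ≠ [] := by
            intro hnil; rw [hnil] at hpref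
            have := List.prefix_nil.1 hpref
            rw [this] at hne; simp at hne
          have h5 : q < ls.length := by
            by_contra hc
            exact h4 (List.drop_eq_nil_of_le (by omega))
          omega
        rw [recursive_string_find]
        simp only [← hpdef, hp]
        rw [pvScan_walk needle ls hne q hpref (q - i) i acc le_rfl hiq
          (fun j hj hjq => hmin j hj hjq)]
        have hcast : p + (needle.length : Int) = ((q + needle.length : Nat) : Int) := by
          rw [hpq]; push_cast; ring
        rw [hcast]
        rw [ih (q + needle.length) f (acc ++ [pvHit ls q]) (by omega) (by omega) (by omega)]
        rw [pvHit_eq_pvMatchAt, hpq]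
        simp

-- ===== VERDICT (by name: the statement is the Claim_ definition above) =====
theorem find_lemmas_spec : Claim_equal_find_lemmas := by
  intro token lemma_string _
  unfold Spec_find_lemmas find_lemmas find_lemmas_alt
  rw [PySem.List.foldl_append_singleton_eq_map]
  have h := pvScan_eq_rsf (' ' :: (PySem.Chars.strip token.toList ++ [' '])) lemma_string.toList
    (by simp only [List.length_cons]; omega)
    (lemma_string.toList.length + 1) 0 (lemma_string.toList.length + 1) []
    (by omega) (by omega) (by omega)
  simpa using h.symm
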